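-- pv_equiv track=rewrite | github.com/Yawn-Sean/Daily_CF_Problems | daily_problems/2025/05/0509/personal_submission/cf12e_liryc.py | solve
-- ===== SOURCE A (Python) =====
-- def solve(n: int) -> list[list[int]]:
--     ans = [[0] * n for _ in range(n)]
--
--     for i in range(n - 1):
--         for j in range(n - 1):
--             ans[i][j] = (i + j) % (n - 1) + 1
--
--     for i in range(n):
--         ans[-1][i] = ans[i][i]
--         ans[i][-1] = ans[i][i]
--         ans[i][i] = 0
--
--     return ans
-- ===== SOURCE B (Python) =====
-- def solve(n: int) -> list[list[int]]:
--     # Rotation-based construction: each inner row is a cyclic rotation of the base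
--     # row [1..n-1] (no per-cell arithmetic); the diagonal values are collected into
--     # the last row while each row is finished by zeroing its diagonal slot and
--     # appending its diagonal value as the last column.
--     k = n - 1
--     base = list(range(1, k + 1))
--     diag = []
--     rows = []
--     for i in range(k):
--         rot = base[i:] + base[:i]
--         d = rot[i]
--         rot[i] = 0
--         rot.append(d)
--         diag.append(d)
--         rows.append(rot)
--     if n >= 1:
--         rows.append(diag + [0])
--     return rows
-- ===== Notes on version B (the rewrite author's own statement) =====
-- stated objective: alternative
-- what changed: Replaces A's two-pass mutate-in-place construction (fill the (n-1)x(n-1) block cell by cell with a modulus, then patch last row/column and diagonal) by building each row as a cyclic rotation (slice concatenation) of one base row [1..n-1], collecting the diagonal values into the last row as it goes - no per-cell modular arithmetic and no fix-up pass.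
import Mathlib
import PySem

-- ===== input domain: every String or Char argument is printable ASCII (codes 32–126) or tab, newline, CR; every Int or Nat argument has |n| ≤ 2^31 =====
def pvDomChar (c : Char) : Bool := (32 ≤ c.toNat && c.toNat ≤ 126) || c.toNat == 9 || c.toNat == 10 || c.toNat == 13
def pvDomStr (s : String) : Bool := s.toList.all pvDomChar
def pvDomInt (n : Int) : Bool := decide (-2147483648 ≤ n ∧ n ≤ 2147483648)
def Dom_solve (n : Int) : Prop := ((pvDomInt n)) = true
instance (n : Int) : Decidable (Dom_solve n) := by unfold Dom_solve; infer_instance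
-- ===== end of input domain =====

-- B replaces A's fill-then-patch two-pass mutation by building each row as a cyclic
-- rotation of one base row [1..n-1] and collecting the diagonal into the last row
-- (objective: alternative construction, same cost).

-- ===== PORT A =====
-- ans[i][j] = v  (i, j nonnegative in-range indices in A's loops)
def pvUpd (m : List (List Int)) (i j : Nat) (v : Int) : List (List Int) :=
  m.set i ((m.getD i []).set j v)

def solve (n : Int) : List (List Int) :=
  let sz := n.toNat
  let ans0 := List.replicate sz (List.replicate sz (0 : Int))
  let k := (n - 1).toNat
  -- for i in range(n-1): for j in range(n-1): ans[i][j] = (i+j)%(n-1)+1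
  let ans1 := (List.range k).foldl (fun m i =>
      (List.range k).foldl (fun m j =>
        pvUpd m i j (PySem.Int.mod ((i : Int) + (j : Int)) (n - 1) + 1)) m) ans0
  -- for i in range(n): ans[-1][i] = ans[i][i]; ans[i][-1] = ans[i][i]; ans[i][i] = 0
  (List.range sz).foldl (fun m i =>
      let m1 := pvUpd m (sz - 1) i ((m.getD i []).getD i 0)
      let m2 := pvUpd m1 i (sz - 1) ((m1.getD i []).getD i 0)
      pvUpd m2 i i 0) ans1

-- ===== PORT B =====
def solve_alt (n : Int) : List (List Int) :=
  let k := (n - 1).toNat                                   -- k = n - 1 (range(k) is empty for n ≤ 1, like Python)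
  let base : List Int := (List.range k).map (fun (t : Nat) => (t : Int) + 1)   -- list(range(1, k + 1))
  let st := (List.range k).foldl (fun (st : List Int × List (List Int)) i =>
      let rot := base.drop i ++ base.take i                -- base[i:] + base[:i]  (0 ≤ i ≤ len: slice_from/to_natCast)
      let d := rot.getD i 0                                -- d = rot[i]  (always in range: i < k = len rot)
      let rot2 := rot.set i 0 ++ [d]                       -- rot[i] = 0; rot.append(d)
      (st.1 ++ [d], st.2 ++ [rot2])) ([], [])              -- diag.append(d); rows.append(rot)
  if n ≥ 1 then st.2 ++ [st.1 ++ [0]] else st.2            -- rows.append(diag + [0])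

-- ===== PRECONDITION & SPEC =====
def Spec_solve (n : Int) (out : List (List Int)) : Prop := out = solve_alt n
instance (n : Int) (out : List (List Int)) : Decidable (Spec_solve n out) := by unfold Spec_solve; infer_instance

-- ===== CLAIM (what is proved, stated in full; the proofs are below) =====
def Claim_equal_solve : Prop := ∀ (n : Int), Dom_solve n → Spec_solve n (solve n)

-- ===== LEMMAS AND PROOFS =====

-- the common direct description of the matrix both ports produce
def pvM (n : Int) : List (List Int) :=
  (List.range n.toNat).map (fun (a : Nat) =>
    (List.range n.toNat).map (fun (b : Nat) =>
      if (a : Int) = (b : Int) then (0 : Int)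
      else if (a : Int) = n - 1 then PySem.Int.mod (2 * (b : Int)) (n - 1) + 1
      else if (b : Int) = n - 1 then PySem.Int.mod (2 * (a : Int)) (n - 1) + 1
      else PySem.Int.mod ((a : Int) + (b : Int)) (n - 1) + 1))

-- the same matrix in Nat arithmetic (size k+1)
def pvMN (k : Nat) : List (List Int) :=
  (List.range (k + 1)).map (fun (a : Nat) =>
    (List.range (k + 1)).map (fun (b : Nat) =>
      if a = b then (0 : Int)
      else if a = k then ((2 * b) % k : Nat) + 1
      else if b = k then ((2 * a) % k : Nat) + 1
      else (((a + b) % k : Nat) : Int) + 1))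

def pvGet (m : List (List Int)) (a b : Nat) : Int := ((m.getD a []).getD b 0)

def Sq (sz : Nat) (m : List (List Int)) : Prop :=
  m.length = sz ∧ ∀ a, a < sz → (m.getD a []).length = sz

theorem getD_set_list (l : List (List Int)) (i a : Nat) (r : List Int) :
    (l.set i r).getD a [] = if a = i ∧ i < l.length then r else l.getD a [] := by
  simp only [List.getD, List.getElem?_set]
  by_cases h1 : i = a
  · subst h1
    by_cases h2 : i < l.length
    · simp [h2]
    · simp [h2, List.getElem?_eq_none (by omega : l.length ≤ i)]
  · have h3 : ¬(a = i ∧ i < l.length) := fun h => h1 h.1.symm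
    simp [h1, h3]

theorem Sq_upd {sz : Nat} {m : List (List Int)} (hm : Sq sz m) (i j : Nat) (v : Int)
    (hi : i < sz) : Sq sz (pvUpd m i j v) := by
  obtain ⟨h1, h2⟩ := hm
  refine ⟨by simp [pvUpd, h1], ?_⟩
  intro a ha
  rw [pvUpd, getD_set_list]
  split_ifs with h
  · rw [List.length_set]; exact h2 i hi
  · exact h2 a ha

theorem pvGet_upd {sz : Nat} {m : List (List Int)} (hm : Sq sz m) {i j : Nat} (v : Int)
    (hi : i < sz) (hj : j < sz) (a b : Nat) :
    pvGet (pvUpd m i j v) a b = if a = i ∧ b = j then v else pvGet m a b := by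
  obtain ⟨h1, h2⟩ := hm
  by_cases hai : a = i
  · subst hai
    rw [pvGet, pvUpd, getD_set_list, if_pos ⟨rfl, by omega⟩]
    by_cases hbj : b = j
    · subst hbj
      have hlen : b < (m.getD a []).length := by rw [h2 a hi]; exact hj
      rw [if_pos ⟨rfl, rfl⟩]
      simp only [List.getD] at hlen ⊢
      simp [List.getElem?_set, hlen]
    · have h4 : j ≠ b := fun hh => hbj hh.symm
      rw [if_neg (by tauto), pvGet]
      simp [List.getD, List.getElem?_set, h4]
  · rw [pvGet, pvUpd, getD_set_list, if_neg (by tauto), if_neg (by tauto), pvGet]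

theorem pvGet_replicate (sz : Nat) (a b : Nat) :
    pvGet (List.replicate sz (List.replicate sz (0 : Int))) a b = 0 := by
  simp only [pvGet, List.getD, List.getElem?_replicate]
  split_ifs <;> simp [List.getElem?_replicate] <;> split_ifs <;> simp

theorem Sq_replicate (sz : Nat) : Sq sz (List.replicate sz (List.replicate sz (0 : Int))) := by
  refine ⟨by simp, ?_⟩
  intro a ha
  rw [List.getD_eq_getElem _ _ (by simpa)]
  simp

-- the value the first pass writes
def pvF1 (n : Int) (i j : Nat) : Int := PySem.Int.mod ((i : Int) + (j : Int)) (n - 1) + 1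

theorem inner_spec {sz : Nat} (n : Int) (i : Nat) (hi : i < sz) :
    ∀ (t : Nat), t ≤ sz → ∀ {m : List (List Int)}, Sq sz m →
      Sq sz ((List.range t).foldl (fun m j => pvUpd m i j (pvF1 n i j)) m) ∧
      ∀ a b, pvGet ((List.range t).foldl (fun m j => pvUpd m i j (pvF1 n i j)) m) a b =
        if a = i ∧ b < t then pvF1 n i b else pvGet m a b := by
  intro t
  induction t with
  | zero => intro _ m hm; exact ⟨hm, by simp⟩
  | succ t ih =>
    intro ht m hm
    have ht' : t ≤ sz := Nat.le_of_succ_le ht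
    obtain ⟨ihSq, ihGet⟩ := ih ht' hm
    rw [List.range_succ, List.foldl_append]
    simp only [List.foldl_cons, List.foldl_nil]
    refine ⟨Sq_upd ihSq i t _ hi, ?_⟩
    intro a b
    rw [pvGet_upd ihSq _ hi (by omega), ihGet]
    split_ifs with h1 h2 h2 <;> first
      | rfl
      | (obtain ⟨rfl, rfl⟩ := h1; rfl)
      | omega

theorem outer_spec {sz : Nat} (n : Int) (k : Nat) (hk : k ≤ sz) :
    ∀ (t : Nat), t ≤ sz → ∀ {m : List (List Int)}, Sq sz m →
      Sq sz ((List.range t).foldl (fun m i =>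
        (List.range k).foldl (fun m j => pvUpd m i j (pvF1 n i j)) m) m) ∧
      ∀ a b, pvGet ((List.range t).foldl (fun m i =>
        (List.range k).foldl (fun m j => pvUpd m i j (pvF1 n i j)) m) m) a b =
        if a < t ∧ b < k then pvF1 n a b else pvGet m a b := by
  intro t
  induction t with
  | zero => intro _ m hm; exact ⟨hm, by simp⟩
  | succ t ih =>
    intro ht m hm
    have ht' : t ≤ sz := Nat.le_of_succ_le ht
    obtain ⟨ihSq, ihGet⟩ := ih ht' hm
    rw [List.range_succ, List.foldl_append]
    simp only [List.foldl_cons, List.foldl_nil]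
    obtain ⟨inSq, inGet⟩ := inner_spec n t (by omega) k hk ihSq
    refine ⟨inSq, ?_⟩
    intro a b
    rw [inGet, ihGet]
    split_ifs with h1 h2 h2 <;> first
      | rfl
      | (obtain ⟨rfl, _⟩ := h1; rfl)
      | omega

-- second pass: the loop body
def pvStep2 (sz : Nat) (m : List (List Int)) (i : Nat) : List (List Int) :=
  let m1 := pvUpd m (sz - 1) i ((m.getD i []).getD i 0)
  let m2 := pvUpd m1 i (sz - 1) ((m1.getD i []).getD i 0)
  pvUpd m2 i i 0

theorem pass2_spec {sz : Nat} {base : List (List Int)} (hb : Sq sz base) :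
    ∀ (t : Nat), t ≤ sz →
      Sq sz ((List.range t).foldl (pvStep2 sz) base) ∧
      ∀ a b, pvGet ((List.range t).foldl (pvStep2 sz) base) a b =
        if a = b ∧ a < t then 0
        else if a = sz - 1 ∧ b < t then pvGet base b b
        else if b = sz - 1 ∧ a < t then pvGet base a a
        else pvGet base a b := by
  intro t
  induction t with
  | zero => intro _; exact ⟨hb, by simp⟩
  | succ t ih =>
    intro ht
    have ht' : t ≤ sz := Nat.le_of_succ_le ht
    have htsz : t < sz := ht
    have hsz1 : sz - 1 < sz := by omega
    obtain ⟨ihSq, ihGet⟩ := ih ht'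
    rw [List.range_succ, List.foldl_append]
    simp only [List.foldl_cons, List.foldl_nil]
    set M := (List.range t).foldl (pvStep2 sz) base with hM
    have hv : pvGet M t t = pvGet base t t := by
      rw [ihGet]; split_ifs <;> first | rfl | omega
    have hSq1 : Sq sz (pvUpd M (sz - 1) t (pvGet base t t)) :=
      Sq_upd ihSq _ _ _ hsz1
    have hg1 : ∀ a b, pvGet (pvUpd M (sz - 1) t (pvGet base t t)) a b =
        if a = sz - 1 ∧ b = t then pvGet base t t else pvGet M a b := by
      intro a b; rw [pvGet_upd ihSq _ hsz1 htsz]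
    have hv2 : pvGet (pvUpd M (sz - 1) t (pvGet base t t)) t t = pvGet base t t := by
      rw [hg1]; split_ifs with h
      · rfl
      · exact hv
    have hSq2 : Sq sz (pvUpd (pvUpd M (sz - 1) t (pvGet base t t)) t (sz - 1)
        (pvGet base t t)) := Sq_upd hSq1 _ _ _ htsz
    have hg2 : ∀ a b, pvGet (pvUpd (pvUpd M (sz - 1) t (pvGet base t t)) t (sz - 1)
        (pvGet base t t)) a b =
        if a = t ∧ b = sz - 1 then pvGet base t t
        else pvGet (pvUpd M (sz - 1) t (pvGet base t t)) a b := by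
      intro a b; rw [pvGet_upd hSq1 _ htsz hsz1]
    have e1 : ((M.getD t []).getD t 0) = pvGet base t t := hv
    constructor
    · show Sq sz (pvStep2 sz M t)
      unfold pvStep2
      simp only []
      rw [e1]
      have e2 : (((pvUpd M (sz - 1) t (pvGet base t t)).getD t []).getD t 0) =
          pvGet base t t := hv2
      rw [e2]
      exact Sq_upd hSq2 _ _ _ htsz
    · intro a b
      show pvGet (pvStep2 sz M t) a b = _
      unfold pvStep2
      simp only []
      rw [e1]
      have e2 : (((pvUpd M (sz - 1) t (pvGet base t t)).getD t []).getD t 0) =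
          pvGet base t t := hv2
      rw [e2]
      rw [pvGet_upd hSq2 _ htsz htsz, hg2, hg1, ihGet]
      split_ifs <;> first | rfl | omega | simp_all

-- A's result is the direct matrix pvM
theorem solve_eq_pvM (n : Int) : solve n = pvM n := by
  by_cases hn : n ≤ 0
  · have h0 : n.toNat = 0 := Int.toNat_of_nonpos hn
    have hk : (n - 1).toNat = 0 := Int.toNat_of_nonpos (by omega)
    simp [solve, pvM, h0, hk]
  · push_neg at hn
    set sz := n.toNat with hsz
    have hszn : (sz : Int) = n := Int.toNat_of_nonneg (by omega)
    have hk : (n - 1).toNat = sz - 1 := by omega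
    have hsz1 : 1 ≤ sz := by omega
    have hb0 := Sq_replicate sz
    obtain ⟨p1Sq, p1Get⟩ := outer_spec (sz := sz) n (sz - 1) (by omega) (sz - 1) (by omega) hb0
    obtain ⟨p2Sq, p2Get⟩ := pass2_spec p1Sq sz (le_refl sz)
    have hsolve : solve n = (List.range sz).foldl (pvStep2 sz)
        ((List.range (sz - 1)).foldl (fun m i =>
          (List.range (sz - 1)).foldl (fun m j => pvUpd m i j (pvF1 n i j)) m)
          (List.replicate sz (List.replicate sz (0 : Int)))) := by
      simp only [solve, pvF1, hk, hsz]
      rfl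
    rw [hsolve]
    set base := (List.range (sz - 1)).foldl (fun m i =>
          (List.range (sz - 1)).foldl (fun m j => pvUpd m i j (pvF1 n i j)) m)
          (List.replicate sz (List.replicate sz (0 : Int))) with hbase
    set fin := (List.range sz).foldl (pvStep2 sz) base with hfin
    have hbaseGet : ∀ a b, pvGet base a b =
        if a < sz - 1 ∧ b < sz - 1 then pvF1 n a b else 0 := by
      intro a b; rw [p1Get, pvGet_replicate]
    apply List.ext_getElem
    · rw [p2Sq.1]; simp [pvM, hsz]
    · intro a ha ha'
      have hasz : a < sz := by rw [p2Sq.1] at ha; exact ha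
      have hrow : (pvM n)[a]'ha' = (List.range n.toNat).map (fun (j : Nat) =>
          if ((a : Int)) = ((j : Int)) then (0 : Int)
          else if ((a : Int)) = n - 1 then PySem.Int.mod (2 * (j : Int)) (n - 1) + 1
          else if ((j : Int)) = n - 1 then PySem.Int.mod (2 * (a : Int)) (n - 1) + 1
          else PySem.Int.mod ((a : Int) + (j : Int)) (n - 1) + 1) := by
        simp only [pvM, List.getElem_map, List.getElem_range]
      rw [hrow]
      have e : fin.getD a [] = fin[a]'ha := by
        simp [List.getD, List.getElem?_eq_getElem ha]
      apply List.ext_getElem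
      · rw [List.length_map, List.length_range, ← e, p2Sq.2 a hasz, hsz]
      · intro b hb hb'
        have hbsz : b < sz := by
          rw [List.length_map, List.length_range] at hb'
          omega
        have hA : fin[a][b] = pvGet fin a b := by
          unfold pvGet
          rw [e]
          have hble : b < (fin[a]'ha).length := by
            rw [← e, p2Sq.2 a hasz]; exact hbsz
          rw [List.getD_eq_getElem _ _ hble]
        rw [hA, p2Get]
        simp only [hbaseGet]
        simp only [List.getElem_map, List.getElem_range]
        unfold pvF1
        split_ifs <;> first
          | rfl
          | omega
          | (congr 2 <;> omega)

-- ---- B side ----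

-- the fold in solve_alt builds the two lists pointwise
theorem fold_build (base : List Int) :
    ∀ (t : Nat), ((List.range t).foldl (fun (st : List Int × List (List Int)) i =>
        let rot := base.drop i ++ base.take i
        let d := rot.getD i 0
        let rot2 := rot.set i 0 ++ [d]
        (st.1 ++ [d], st.2 ++ [rot2])) ([], [])) =
      ((List.range t).map (fun i => (base.drop i ++ base.take i).getD i 0),
       (List.range t).map (fun i =>
         (base.drop i ++ base.take i).set i 0 ++ [(base.drop i ++ base.take i).getD i 0])) := by
  intro t
  induction t with
  | zero => simp
  | succ t ih =>
    rw [List.range_succ, List.foldl_append, ih]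
    simp

def pvRot (k i : Nat) : List Int :=
  ((List.range k).map (fun (t : Nat) => (t : Int) + 1)).drop i ++
  ((List.range k).map (fun (t : Nat) => (t : Int) + 1)).take i

theorem pvRot_length (k i : Nat) (hi : i < k) : (pvRot k i).length = k := by
  simp [pvRot]
  omega

theorem pvRot_get (k i j : Nat) (hi : i < k) (hj : j < k)
    (h : j < (pvRot k i).length) :
    (pvRot k i)[j] = (((i + j) % k : Nat) : Int) + 1 := by
  have hlen : (((List.range k).map (fun (t : Nat) => (t : Int) + 1)).drop i).length = k - i := by
    simp
  by_cases hc : j < k - i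
  · simp only [pvRot] at h ⊢
    rw [List.getElem_append_left (by omega), List.getElem_drop]
    simp only [List.getElem_map, List.getElem_range]
    rw [Nat.mod_eq_of_lt (by omega : i + j < k)]
  · simp only [pvRot] at h ⊢
    rw [List.getElem_append_right (by simp; omega)]
    simp only [List.length_drop, List.length_map, List.length_range, List.getElem_take,
      List.getElem_map, List.getElem_range]
    have hmod : (i + j) % k = j - (k - i) := by
      have h2 : i + j = (j - (k - i)) + k := by omega
      rw [h2, Nat.add_mod_right]
      exact Nat.mod_eq_of_lt (by omega)
    rw [hmod]

theorem pvRot_getD (k i j : Nat) (hi : i < k) (hj : j < k) :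
    (pvRot k i).getD j 0 = (((i + j) % k : Nat) : Int) + 1 := by
  rw [List.getD_eq_getElem _ _ (by rw [pvRot_length k i hi]; exact hj)]
  exact pvRot_get k i j hi hj _

-- row i of B (i < k) is row i of pvMN k
theorem row_eq (k i : Nat) (hi : i < k) :
    (pvRot k i).set i 0 ++ [(pvRot k i).getD i 0] =
    (List.range k ++ [k]).map (fun (b : Nat) =>
      if i = b then (0 : Int)
      else if i = k then ((2 * b) % k : Nat) + 1
      else if b = k then ((2 * i) % k : Nat) + 1
      else (((i + b) % k : Nat) : Int) + 1) := by
  rw [List.map_append]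
  congr 1
  · apply List.ext_getElem
    · rw [List.length_set, pvRot_length k i hi]; simp
    · intro b hb hb'
      have hbk : b < k := by rw [List.length_set, pvRot_length k i hi] at hb; exact hb
      rw [List.getElem_set]
      simp only [List.getElem_map, List.getElem_range]
      by_cases hib : i = b
      · simp [hib]
      · rw [if_neg hib, if_neg hib, if_neg (by omega : ¬ i = k), if_neg (by omega : ¬ b = k)]
        exact pvRot_get k i b hi hbk _
  · simp only [List.map_cons, List.map_nil]
    rw [pvRot_getD k i i hi hi]
    have h1 : i ≠ k := by omega
    simp [h1, Nat.two_mul]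

theorem solve_alt_eq_pvMN (n : Int) (hn : 1 ≤ n) :
    solve_alt n = pvMN ((n - 1).toNat) := by
  set k := (n - 1).toNat with hkdef
  have halt : solve_alt n =
      (List.range k).map (fun i =>
        (pvRot k i).set i 0 ++ [(pvRot k i).getD i 0]) ++
      [(List.range k).map (fun i => (pvRot k i).getD i 0) ++ [0]] := by
    simp only [solve_alt]
    rw [fold_build]
    simp only [pvRot]
    rw [if_pos hn]
  rw [halt, pvMN, List.range_succ, List.map_append]
  congr 1
  · apply List.map_congr_left
    intro i hi
    have hik : i < k := List.mem_range.mp hi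
    rw [row_eq k i hik]
  · simp only [List.map_cons, List.map_nil]
    congr 1
    rw [List.map_append]
    congr 1
    · apply List.map_congr_left
      intro b hb
      have hbk : b < k := List.mem_range.mp hb
      rw [pvRot_getD k b b hbk hbk]
      have hkb : k ≠ b := by omega
      simp [hkb, Nat.two_mul]
    · simp

theorem pvM_eq_pvMN (n : Int) (hn : 1 ≤ n) : pvM n = pvMN ((n - 1).toNat) := by
  set k := (n - 1).toNat with hkdef
  have hk : (k : Int) = n - 1 := by omega
  have hsz : n.toNat = k + 1 := by omega
  unfold pvM pvMN
  rw [hsz]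
  apply List.map_congr_left
  intro a _
  apply List.map_congr_left
  intro b _
  have c1 : ((a : Int) = (b : Int)) = (a = b) := by simp
  have c2 : ((a : Int) = n - 1) = (a = k) := by rw [← hk]; simp
  have c3 : ((b : Int) = n - 1) = (b = k) := by rw [← hk]; simp
  simp only [c1, c2, c3]
  have m1 : PySem.Int.mod (2 * (b : Int)) (n - 1) = (((2 * b) % k : Nat) : Int) := by
    rw [show (2 * (b : Int)) = ((2 * b : Nat) : Int) by push_cast; ring, ← hk,
      PySem.Int.mod_natCast]
  have m2 : PySem.Int.mod (2 * (a : Int)) (n - 1) = (((2 * a) % k : Nat) : Int) := by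
    rw [show (2 * (a : Int)) = ((2 * a : Nat) : Int) by push_cast; ring, ← hk,
      PySem.Int.mod_natCast]
  have m3 : PySem.Int.mod ((a : Int) + (b : Int)) (n - 1) = (((a + b) % k : Nat) : Int) := by
    rw [show ((a : Int) + (b : Int)) = ((a + b : Nat) : Int) by push_cast; ring, ← hk,
      PySem.Int.mod_natCast]
  rw [m1, m2, m3]

theorem solve_alt_eq_pvM (n : Int) : solve_alt n = pvM n := by
  by_cases hn : n ≤ 0
  · have h0 : n.toNat = 0 := Int.toNat_of_nonpos hn
    have hk : (n - 1).toNat = 0 := Int.toNat_of_nonpos (by omega)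
    have : ¬ (n ≥ 1) := by omega
    simp [solve_alt, pvM, h0, hk, this]
  · push_neg at hn
    rw [solve_alt_eq_pvMN n (by omega), pvM_eq_pvMN n (by omega)]

-- ===== VERDICT (by name: the statement is the Claim_ definition above) =====
theorem solve_spec : Claim_equal_solve := by
  intro n _
  unfold Spec_solve
  rw [solve_eq_pvM, solve_alt_eq_pvM]
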